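-- pv_equiv track=rewrite | github.com/butwhoistrace/robosnap | robosnap.py | filter_interesting
-- ===== SOURCE A (Python) =====
-- INTERESTING_KEYWORDS = [
--     "admin", "backup", "config", "secret", "hidden", "internal",
--     "private", "debug", "test", "staging", "api", "login",
--     "dashboard", "database", "dump", "env", "password", "user",
--     "data", "upload", "panel", "manage", "console", "dev",
--     "old", "tmp", "temp", "bak", "sql", "log", "cgi-bin"
-- ]
--
-- def filter_interesting(paths):
--     interesting = []
--     for path in paths:
--         for kw in INTERESTING_KEYWORDS:
--             if kw in path.lower():
--                 interesting.append(path)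
--                 break
--     return interesting
-- ===== SOURCE B (Python) =====
-- INTERESTING_KEYWORDS = [
--     "admin", "backup", "config", "secret", "hidden", "internal",
--     "private", "debug", "test", "staging", "api", "login",
--     "dashboard", "database", "dump", "env", "password", "user",
--     "data", "upload", "panel", "manage", "console", "dev",
--     "old", "tmp", "temp", "bak", "sql", "log", "cgi-bin"
-- ]
--
-- # index the keywords by their first character, built once at import time
-- _BY_FIRST = {}
-- for _kw in INTERESTING_KEYWORDS:
--     _BY_FIRST[_kw[0]] = _BY_FIRST.get(_kw[0], []) + [_kw]
--
--
-- def _matches(low):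
--     # single left-to-right scan: at each position, only try the keywords
--     # whose first character is the character at that position
--     for i, c in enumerate(low):
--         for kw in _BY_FIRST.get(c, []):
--             if low.startswith(kw, i):
--                 return True
--     return False
--
--
-- def filter_interesting(paths):
--     return [p for p in paths if _matches(p.lower())]
-- ===== Notes on version B (the rewrite author's own statement) =====
-- stated objective: alternative
-- what changed: B replaces A's per-keyword substring searches (break on first hit, explicit accumulator loop) with a single positional scan of each lowered path driven by a first-character hash index over the keywords, inside a filtering comprehension.
import Mathlib
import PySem

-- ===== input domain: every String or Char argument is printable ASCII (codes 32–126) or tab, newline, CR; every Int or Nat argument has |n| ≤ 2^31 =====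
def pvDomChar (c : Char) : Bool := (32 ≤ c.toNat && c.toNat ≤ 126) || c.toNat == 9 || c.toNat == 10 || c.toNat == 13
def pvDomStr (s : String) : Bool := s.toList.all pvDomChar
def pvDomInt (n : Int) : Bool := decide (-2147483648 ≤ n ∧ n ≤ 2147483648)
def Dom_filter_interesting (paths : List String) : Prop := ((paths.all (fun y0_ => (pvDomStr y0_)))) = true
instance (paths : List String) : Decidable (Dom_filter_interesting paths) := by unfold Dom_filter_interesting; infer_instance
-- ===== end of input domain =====

-- B replaces A's per-keyword substring searches with a single positional scan of each
-- lowered path driven by a first-character index over the keywords (objective: alternative).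

def kwList : List String :=
  ["admin", "backup", "config", "secret", "hidden", "internal",
   "private", "debug", "test", "staging", "api", "login",
   "dashboard", "database", "dump", "env", "password", "user",
   "data", "upload", "panel", "manage", "console", "dev",
   "old", "tmp", "temp", "bak", "sql", "log", "cgi-bin"]

-- ===== PORT A =====
-- inner 'for kw in INTERESTING_KEYWORDS: if kw in path.lower(): interesting.append(path); break'
def aLoopKw : List String → String → List String → List String
  | [], _, interesting => interesting
  | kw :: rest, path, interesting =>
      if PySem.Str.isIn kw (PySem.Str.lower path) then interesting ++ [path]
      else aLoopKw rest path interesting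

def filter_interesting (paths : List String) : List String :=
  paths.foldl (fun interesting path => aLoopKw kwList path interesting) []

-- ===== PORT B =====
-- kw[0]; exact here since every keyword in kwList is nonempty
def headOf (kw : String) : Char := kw.toList.headD ' '

-- '_BY_FIRST[kw[0]] = _BY_FIRST.get(kw[0], []) + [kw]' over the keywords
def kwDict : PySem.Dict Char (List String) :=
  kwList.foldl (fun d kw => d.modify (headOf kw) [] (· ++ [kw])) PySem.Dict.empty

-- '_matches(low)': 'low.startswith(kw, i)' ported as a prefix test on the i-suffix (exact for 0 ≤ i ≤ len)
def altMatches (low : List Char) : Bool :=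
  (PySem.List.enumerate low).any (fun ic =>
    (kwDict.getD ic.2 []).any (fun kw => PySem.Chars.startswith (low.drop ic.1.toNat) kw.toList))

def filter_interesting_alt (paths : List String) : List String :=
  paths.filter (fun p => altMatches (PySem.Str.lower p).toList)

-- ===== PRECONDITION & SPEC =====
def Spec_filter_interesting (paths : List String) (out : List String) : Prop := out = filter_interesting_alt paths
instance (paths : List String) (out : List String) : Decidable (Spec_filter_interesting paths out) := by unfold Spec_filter_interesting; infer_instance

-- ===== CLAIM (what is proved, stated in full; the proofs are below) =====
def Claim_equal_filter_interesting : Prop := ∀ (paths : List String), Dom_filter_interesting paths → Spec_filter_interesting paths (filter_interesting paths)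

-- ===== LEMMAS AND PROOFS =====

-- A's inner keyword loop is 'append iff some keyword is a substring'
theorem aLoopKw_eq (kws : List String) (path : String) (acc : List String) :
    aLoopKw kws path acc =
      if kws.any (fun kw => PySem.Str.isIn kw (PySem.Str.lower path)) then acc ++ [path] else acc := by
  induction kws with
  | nil => simp [aLoopKw]
  | cons kw rest ih =>
      unfold aLoopKw
      rw [List.any_cons]
      cases h : PySem.Str.isIn kw (PySem.Str.lower path)
      · simpa using ih
      · simp

theorem kw_nonempty : ∀ kw ∈ kwList, kw.toList ≠ [] := by decide

-- the first-character index holds exactly the keywords starting with that character, in order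
theorem bucket_eq (c : Char) :
    kwDict.getD c [] = kwList.filter (fun kw => headOf kw == c) := by
  unfold kwDict
  have h1 : kwList.foldl (fun d kw => d.modify (headOf kw) [] (· ++ [kw])) PySem.Dict.empty
      = (kwList.map (fun kw => (headOf kw, kw))).foldl
          (fun d p => d.modify p.1 [] (· ++ [p.2])) PySem.Dict.empty := by
    rw [List.foldl_map]
  rw [h1, PySem.Dict.getD_foldl_modify_append]
  simp [List.filter_map, Function.comp_def]

-- A's test (some keyword occurs as a substring) equals B's positional test
theorem cond_eq (path : String) :
    (kwList.any (fun kw => PySem.Str.isIn kw (PySem.Str.lower path)))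
      = altMatches (PySem.Str.lower path).toList := by
  set low := (PySem.Str.lower path).toList with hlow
  rcases Bool.eq_false_or_eq_true (altMatches low) with h | h <;> rw [h]
  · -- some position matches: that keyword is a substring
    unfold altMatches at h
    rw [List.any_eq_true] at h
    obtain ⟨ic, hmem, hi⟩ := h
    obtain ⟨k, hk, rfl⟩ := (PySem.List.mem_enumerate_iff _ _ _).mp hmem
    rw [List.any_eq_true] at hi ⊢
    obtain ⟨kw, hkw, hsw⟩ := hi
    rw [bucket_eq] at hkw
    refine ⟨kw, (List.mem_filter.mp hkw).1, ?_⟩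
    rw [PySem.Str.isIn_eq, ← hlow, PySem.Chars.isIn_iff_infix]
    have hdrop : ((0 : Int) + (k : Int)).toNat = k := by omega
    rw [hdrop] at hsw
    exact List.IsInfix.trans
      ((PySem.Chars.startswith_iff _ _).mp hsw).isInfix
      (List.drop_suffix k low).isInfix
  · -- no position matches: no keyword is a substring
    rw [List.any_eq_false]
    intro kw hkw
    simp only [Bool.not_eq_true, PySem.Str.isIn_eq, ← hlow, PySem.Chars.isIn_eq_false_iff]
    intro hinf
    have hex : ∃ j, kw.toList <+: low.drop j :=
      (PySem.Chars.exists_prefix_drop_iff_isIn _ _).mpr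
        ((PySem.Chars.isIn_iff_infix _ _).mpr hinf)
    obtain ⟨j, hj⟩ := hex
    have hjlt : j < low.length := by
      by_contra hge
      have hd : low.drop j = [] := List.drop_eq_nil_of_le (by omega)
      rw [hd, List.prefix_nil] at hj
      exact kw_nonempty kw hkw hj
    obtain ⟨h0, t, hcons⟩ := List.exists_cons_of_ne_nil (kw_nonempty kw hkw)
    obtain ⟨s, hs⟩ := hj
    have hjc : low[j] = h0 := by
      have h2 : low[j]? = some h0 := by
        have h3 : low[j]? = (List.drop j low)[0]? := by
          simp [List.getElem?_drop]
        rw [h3, ← hs, hcons]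
        rfl
      simp [List.getElem?_eq_getElem hjlt] at h2
      exact h2
    have htrue : altMatches low = true := by
      unfold altMatches
      rw [List.any_eq_true]
      refine ⟨((0 : Int) + (j : Int), low[j]),
        (PySem.List.mem_enumerate_iff _ _ _).mpr ⟨j, hjlt, rfl⟩, ?_⟩
      rw [List.any_eq_true]
      refine ⟨kw, ?_, ?_⟩
      · rw [bucket_eq]
        refine List.mem_filter.mpr ⟨hkw, ?_⟩
        simp [headOf, hcons, hjc]
      · have hdrop : ((0 : Int) + (j : Int)).toNat = j := by omega
        rw [hdrop]
        exact (PySem.Chars.startswith_iff _ _).mpr ⟨s, hs⟩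
    rw [h] at htrue
    exact absurd htrue (by simp)

-- ===== VERDICT (by name: the statement is the Claim_ definition above) =====
theorem filter_interesting_spec : Claim_equal_filter_interesting := by
  intro paths _
  unfold Spec_filter_interesting filter_interesting filter_interesting_alt
  have : ∀ interesting path, aLoopKw kwList path interesting =
      if altMatches (PySem.Str.lower path).toList then interesting ++ [path] else interesting := by
    intro acc p; rw [aLoopKw_eq, cond_eq]
  simp only [this]
  exact (PySem.List.foldl_append_if_eq_filter _ _ _).trans (by simp)
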